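-- pv_equiv track=rewrite | github.com/spathiyal/python | python-ds-practice/11_flip_case/flip_case.py | flip_case
-- ===== SOURCE A (Python) =====
-- def flip_case(phrase, to_swap):
--     """Flip [to_swap] case each time it appears in phrase.
--
--         >>> flip_case('Aaaahhh', 'a')
--         'aAAAhhh'
--
--         >>> flip_case('Aaaahhh', 'A')
--         'aAAAhhh'
--
--         >>> flip_case('Aaaahhh', 'h')
--         'AaaaHHH'
--
--     """
--     word = []
--     for letter in phrase:
--
--             if letter.isupper() and letter.lower()== to_swap.lower():
--                 word.append(letter.lower())
--             elif letter.islower() and letter.lower()== to_swap.lower():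
--                  word.append(letter.upper())
--             else:
--                  word.append(letter)
--     return (''.join(word))
-- ===== SOURCE B (Python) =====
-- def flip_case(phrase, to_swap):
--     key = to_swap.lower()
--     table = {}
--     for c in set(phrase):
--         if c.isupper() and c.lower() == key:
--             table[ord(c)] = c.lower()
--         elif c.islower() and c.lower() == key:
--             table[ord(c)] = c.upper()
--     return phrase.translate(table)
-- ===== Notes on version B (the rewrite author's own statement) =====
-- stated objective: faster
-- what changed: B lowers to_swap once and precomputes a translation table over the distinct characters of phrase (with A's exact branch logic), then applies it in one str.translate pass, instead of A's per-occurrence branch testing that re-lowers to_swap for every character while accumulating a list.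
import Mathlib
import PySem

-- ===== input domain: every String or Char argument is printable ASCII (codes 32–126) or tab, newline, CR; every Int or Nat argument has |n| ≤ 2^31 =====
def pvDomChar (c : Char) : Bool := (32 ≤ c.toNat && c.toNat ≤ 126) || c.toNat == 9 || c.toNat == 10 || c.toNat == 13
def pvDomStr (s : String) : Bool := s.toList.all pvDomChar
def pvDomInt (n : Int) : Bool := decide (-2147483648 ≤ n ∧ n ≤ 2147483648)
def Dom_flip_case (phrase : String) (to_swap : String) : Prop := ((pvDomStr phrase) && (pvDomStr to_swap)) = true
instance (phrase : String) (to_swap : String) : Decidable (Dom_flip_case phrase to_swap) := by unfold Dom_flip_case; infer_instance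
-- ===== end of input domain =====

-- B builds a translation table over the DISTINCT characters of phrase once, then maps
-- phrase through it in a single library-driven pass (str.translate) — idiomatic; A
-- instead re-tests the branch conditions on every occurrence while accumulating a list.

-- ===== PORT A =====
-- word = []; for letter in phrase: append the (possibly case-flipped) letter; ''.join(word)
def flip_case (phrase : String) (to_swap : String) : String :=
  String.mk (phrase.toList.foldl
    (fun word letter =>
      if PySem.Chars.isupper letter &&
          (PySem.Chars.lower [letter] == PySem.Chars.lower to_swap.toList) then
        word ++ PySem.Chars.lower [letter]
      else if PySem.Chars.islower letter &&
          (PySem.Chars.lower [letter] == PySem.Chars.lower to_swap.toList) then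
        word ++ PySem.Chars.upper [letter]
      else
        word ++ [letter]) [])

-- ===== PORT B =====
-- key = to_swap.lower(); table over set(phrase); phrase.translate(table).
-- Python's table is keyed by code point (ord c); keying the Dict by the Char itself is
-- the same lookup since ord is injective. translate maps each char of phrase to its
-- table entry (a one-char string) or itself: ported as flatMap over getD.
def flip_case_alt (phrase : String) (to_swap : String) : String :=
  let key := PySem.Chars.lower to_swap.toList
  let table : PySem.Dict Char (List Char) :=
    (PySem.Set.ofList phrase.toList).foldl
      (fun t c =>
        if PySem.Chars.isupper c && (PySem.Chars.lower [c] == key) then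
          t.insert c (PySem.Chars.lower [c])
        else if PySem.Chars.islower c && (PySem.Chars.lower [c] == key) then
          t.insert c (PySem.Chars.upper [c])
        else t)
      ⟨[]⟩
  String.mk (phrase.toList.flatMap (fun c => table.getD c [c]))

-- ===== PRECONDITION & SPEC =====
def Spec_flip_case (phrase : String) (to_swap : String) (out : String) : Prop := out = flip_case_alt phrase to_swap
instance (phrase : String) (to_swap : String) (out : String) : Decidable (Spec_flip_case phrase to_swap out) := by unfold Spec_flip_case; infer_instance

-- ===== CLAIM (what is proved, stated in full; the proofs are below) =====
def Claim_equal_flip_case : Prop := ∀ (phrase : String) (to_swap : String), Dom_flip_case phrase to_swap → Spec_flip_case phrase to_swap (flip_case phrase to_swap)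

-- ===== LEMMAS AND PROOFS =====

-- A's per-letter value.
def pvStep (key : List Char) (c : Char) : List Char :=
  if PySem.Chars.isupper c && (PySem.Chars.lower [c] == key) then PySem.Chars.lower [c]
  else if PySem.Chars.islower c && (PySem.Chars.lower [c] == key) then PySem.Chars.upper [c]
  else [c]

-- Lookup in B's table after the whole fold: the entry is A's per-letter value for every
-- character of the scanned list that fires a branch, and the incoming default otherwise.
theorem pvTable_getD (key : List Char) (l : List Char) (t : PySem.Dict Char (List Char)) (c : Char) :
    ((l.foldl
      (fun t c =>
        if PySem.Chars.isupper c && (PySem.Chars.lower [c] == key) then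
          t.insert c (PySem.Chars.lower [c])
        else if PySem.Chars.islower c && (PySem.Chars.lower [c] == key) then
          t.insert c (PySem.Chars.upper [c])
        else t) t).getD c [c]) =
    if c ∈ l ∧ ((PySem.Chars.isupper c && (PySem.Chars.lower [c] == key)) ||
                (PySem.Chars.islower c && (PySem.Chars.lower [c] == key))) then
      pvStep key c
    else t.getD c [c] := by
  induction l generalizing t with
  | nil => simp
  | cons a l ih =>
    simp only [List.foldl_cons, ih, List.mem_cons]
    by_cases hc : c = a
    · subst hc
      by_cases h1 : (PySem.Chars.isupper c && (PySem.Chars.lower [c] == key)) = true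
      · simp [h1, pvStep]
      · by_cases h2 : (PySem.Chars.islower c && (PySem.Chars.lower [c] == key)) = true
        · simp [h1, h2, pvStep]
        · simp [h1, h2]
    · split_ifs with hl <;>
        simp_all [PySem.Dict.getD_insert]

theorem flip_case_eq_flatMap (phrase to_swap : String) :
    flip_case phrase to_swap =
      String.mk (phrase.toList.flatMap (pvStep (PySem.Chars.lower to_swap.toList))) := by
  unfold flip_case
  congr 1
  have h : ∀ (l : List Char) (acc : List Char),
      l.foldl
        (fun word letter =>
          if PySem.Chars.isupper letter &&
              (PySem.Chars.lower [letter] == PySem.Chars.lower to_swap.toList) then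
            word ++ PySem.Chars.lower [letter]
          else if PySem.Chars.islower letter &&
              (PySem.Chars.lower [letter] == PySem.Chars.lower to_swap.toList) then
            word ++ PySem.Chars.upper [letter]
          else
            word ++ [letter]) acc =
      acc ++ l.flatMap (pvStep (PySem.Chars.lower to_swap.toList)) := by
    intro l
    induction l with
    | nil => simp
    | cons a l ih =>
      intro acc
      simp only [List.foldl_cons, ih, List.flatMap_cons, pvStep]
      split_ifs <;> simp
  simpa using h phrase.toList []

-- ===== VERDICT (by name: the statement is the Claim_ definition above) =====
theorem flip_case_spec : Claim_equal_flip_case := by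
  intro phrase to_swap _
  show flip_case phrase to_swap = flip_case_alt phrase to_swap
  rw [flip_case_eq_flatMap]
  unfold flip_case_alt
  congr 1
  apply List.flatMap_congr
  intro c hc
  rw [pvTable_getD]
  have hmem : c ∈ PySem.Set.ofList phrase.toList := (PySem.Set.mem_ofList _ _).mpr hc
  by_cases h1 : (PySem.Chars.isupper c &&
      (PySem.Chars.lower [c] == PySem.Chars.lower to_swap.toList)) = true
  · simp [hmem, h1]
  · by_cases h2 : (PySem.Chars.islower c &&
        (PySem.Chars.lower [c] == PySem.Chars.lower to_swap.toList)) = true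
    · simp [hmem, h1, h2]
    · simp [h1, h2, pvStep, PySem.Dict.getD, PySem.Dict.get?]
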